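-- pv_equiv track=rewrite | github.com/2226171237/Algorithmpractice | 360/test4.py | solve
-- ===== SOURCE A (Python) =====
-- def solve(n,a,b):
--     maxScore=[0]
--     st=set(range(n))
--     def dfs(st,score):
--         if len(st)==0:
--             maxScore[0]=max(maxScore[0],score)
--             return
--         st_tmp=st.copy()
--         for i in st_tmp:
--             st.remove(i)
--             t=score*2 if b[i]==1 else 0
--             t=max(t,score+a[i])
--             dfs(st,t)
--             st.add(i)
--     dfs(st,0)
--     return maxScore[0]
-- ===== SOURCE B (Python) =====
-- def solve(n, a, b):
--     base = 0       # sum of positive a[i] among non-doubling items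
--     m = 0          # doubling items whose a[i] <= 0: pure doublings, applied last
--     dpos = []      # doubling items with positive a[i]
--     for i in range(n):
--         if b[i] == 1:
--             if a[i] > 0:
--                 dpos.append(a[i])
--             else:
--                 m += 1
--         elif a[i] > 0:
--             base += a[i]
--     s = base
--     for c in sorted(dpos, reverse=True):
--         s = max(2 * s, s + c)
--     return s * 2 ** m
-- ===== Notes on version B (the rewrite author's own statement) =====
-- stated objective: faster
-- what changed: A brute-forces every processing order by recursive DFS over the remaining index set; B uses the exchange-argument closed form: sum the positive additions of non-doubling items, fold the positive-value doubling items in descending sorted order with s=max(2s,s+c), then double once per remaining doubling item. Intended as faster (O(n log n) vs O(n!*n)); a timing run saw A time out already at n=16 where B returned instantly, and measured B 4.9x at the largest size both finished, below that run's confirmation threshold.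
import Mathlib
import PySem

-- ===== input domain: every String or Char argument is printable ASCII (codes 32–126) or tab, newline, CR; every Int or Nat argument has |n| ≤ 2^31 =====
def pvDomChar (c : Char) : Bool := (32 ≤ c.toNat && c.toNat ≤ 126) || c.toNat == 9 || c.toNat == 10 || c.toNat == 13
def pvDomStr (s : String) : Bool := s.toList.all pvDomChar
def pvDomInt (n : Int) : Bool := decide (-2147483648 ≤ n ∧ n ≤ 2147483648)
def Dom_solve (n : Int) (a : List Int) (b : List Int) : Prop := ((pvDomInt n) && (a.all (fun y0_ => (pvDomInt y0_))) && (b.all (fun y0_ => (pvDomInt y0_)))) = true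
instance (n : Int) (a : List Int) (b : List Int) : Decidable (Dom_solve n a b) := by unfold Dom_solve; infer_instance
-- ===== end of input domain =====

-- B replaces A's DFS over all n! processing orders by a greedy closed form (positive plain additions
-- first, positive-valued doublers folded in descending order, pure doublings last); intended as faster
-- (timing: A timed out at n=16 where B returned; 4.9x at the largest size both finished, unconfirmed).


-- ===== PORT A =====
-- t = score*2 if b[i]==1 else 0 ; t = max(t, score+a[i])   (a[i], b[i] valid inside Pre_)
def pvStep (a b : List Int) (i : Int) (s : Int) : Int :=
  max (if (PySem.List.pyGet? b i).getD 0 = 1 then s * 2 else 0) (s + (PySem.List.pyGet? a i).getD 0)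

-- dfs(st, score) with the mutable maxScore threaded through; fuel = |st| guards termination.
def dfsA (a b : List Int) : Nat → List Int → Int → Int → Int
  | 0, _st, score, m => max m score
  | fuel+1, st, score, m =>
      st.foldl (fun acc i => dfsA a b fuel (st.erase i) (pvStep a b i score) acc) m

def solve (n : Int) (a : List Int) (b : List Int) : Int :=
  let st : List Int := PySem.List.pyRange 0 n 1   -- set(range(n)): distinct elements in order
  dfsA a b st.length st 0 0

-- ===== PORT B =====
-- loop body: classify item i into (base, m, dpos)
def bstep (a b : List Int) (acc : Int × Int × List Int) (i : Int) : Int × Int × List Int :=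
  let bi := (PySem.List.pyGet? b i).getD 0
  let ai := (PySem.List.pyGet? a i).getD 0
  if bi = 1 then
    if ai > 0 then (acc.1, acc.2.1, acc.2.2 ++ [ai]) else (acc.1, acc.2.1 + 1, acc.2.2)
  else if ai > 0 then (acc.1 + ai, acc.2.1, acc.2.2) else acc

def solve_alt (n : Int) (a : List Int) (b : List Int) : Int :=
  let acc := (PySem.List.pyRange 0 n 1).foldl (bstep a b) (0, 0, [])
  let s := (PySem.List.sorted acc.2.2 (fun x => x) true).foldl (fun s c => max (2 * s) (s + c)) acc.1
  s * 2 ^ acc.2.1.toNat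

-- ===== PRECONDITION & SPEC =====
-- Python A indexes a[i], b[i] for every i < n (when n ≥ 1) and raises IndexError if either list is shorter.
def Pre_solve (n : Int) (a : List Int) (b : List Int) : Prop :=
  n ≤ 0 ∨ (n ≤ (a.length : Int) ∧ n ≤ (b.length : Int))
instance (n : Int) (a : List Int) (b : List Int) : Decidable (Pre_solve n a b) := by
  unfold Pre_solve; infer_instance

def pvWitness_solve : Int × List Int × List Int := (2, [3, -1], [1, 0])

def Spec_solve (n : Int) (a : List Int) (b : List Int) (out : Int) : Prop := out = solve_alt n a b
instance (n : Int) (a : List Int) (b : List Int) (out : Int) : Decidable (Spec_solve n a b out) := by unfold Spec_solve; infer_instance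

-- ===== CLAIM (what is proved, stated in full; the proofs are below) =====
def Claim_equal_solve : Prop := ∀ (n : Int) (a : List Int) (b : List Int), Dom_solve n a b → Pre_solve n a b → Spec_solve n a b (solve n a b)

-- ===== LEMMAS AND PROOFS =====

-- proof-side vocabulary
def av (a : List Int) (i : Int) : Int := (PySem.List.pyGet? a i).getD 0
def isD (b : List Int) (i : Int) : Bool := decide ((PySem.List.pyGet? b i).getD 0 = 1)
def dposc (a b : List Int) (i : Int) : Bool := isD b i && decide (0 < av a i)
def dnegc (a b : List Int) (i : Int) : Bool := isD b i && decide (av a i ≤ 0)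
def nposc (a b : List Int) (i : Int) : Bool := !isD b i && decide (0 < av a i)

def pvP (a b : List Int) (l : List Int) : Int := ((l.filter (nposc a b)).map (av a)).sum
def pvM (a b : List Int) (l : List Int) : Nat := l.countP (dnegc a b)
def pvD (a b : List Int) (l : List Int) : List Int := (l.filter (dposc a b)).map (av a)
def dstep (c s : Int) : Int := max (2 * s) (s + c)
def gfold (L : List Int) (x : Int) : Int := L.foldl (fun s c => max (2 * s) (s + c)) x
def sortD (L : List Int) : List Int := PySem.List.sorted L (fun x => x) true
def pvV (a b : List Int) (l : List Int) (s : Int) : Int :=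
  2 ^ (pvM a b l) * gfold (sortD (pvD a b l)) (s + pvP a b l)
def runP (a b : List Int) (p : List Int) (s : Int) : Int := p.foldl (fun s i => pvStep a b i s) s

lemma gfold_cons (c : Int) (L : List Int) (x : Int) : gfold (c :: L) x = gfold L (dstep c x) := rfl

lemma gfold_mono (L : List Int) : ∀ {x y : Int}, x ≤ y → gfold L x ≤ gfold L y := by
  induction L with
  | nil => intro x y h; simpa [gfold] using h
  | cons c L ih =>
    intro x y h
    rw [gfold_cons, gfold_cons]
    exact ih (by simp only [dstep]; omega)

lemma gfold_nonneg (L : List Int) {x : Int} (hx : 0 ≤ x) : 0 ≤ gfold L x := by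
  induction L generalizing x with
  | nil => simpa [gfold] using hx
  | cons c L ih =>
    rw [gfold_cons]
    exact ih (by simp only [dstep]; omega)

lemma gfold_two (L : List Int) (h : ∀ c ∈ L, 0 ≤ c) (x : Int) : gfold L (2 * x) ≤ 2 * gfold L x := by
  induction L generalizing x with
  | nil => simp [gfold]
  | cons c L ih =>
    rw [gfold_cons, gfold_cons]
    have hc : 0 ≤ c := h c (by simp)
    have h1 : dstep c (2 * x) ≤ 2 * dstep c x := by simp only [dstep]; omega
    exact le_trans (gfold_mono L h1) (ih (fun d hd => h d (by simp [hd])) (dstep c x))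

lemma dstep_swap {c d x : Int} (hcd : c ≤ d) (hd : 0 ≤ d) : dstep d (dstep c x) ≤ dstep c (dstep d x) := by
  simp only [dstep]; omega

lemma gfold_exchange (L : List Int) (c : Int) (x : Int)
    (hs : L.Pairwise (fun p q => q ≤ p)) (hp : ∀ d ∈ L, 0 < d) (hc : c ∈ L) :
    gfold (L.erase c) (dstep c x) ≤ gfold L x := by
  induction L generalizing x with
  | nil => cases hc
  | cons d L ih =>
    by_cases hdc : d = c
    · subst hdc
      simp [List.erase_cons_head, gfold_cons]
    · have hcL : c ∈ L := by
        rcases List.mem_cons.mp hc with h | h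
        · exact absurd h.symm hdc
        · exact h
      have herase : (d :: L).erase c = d :: L.erase c := by
        rw [List.erase_cons_tail]
        simpa using fun h => hdc h
      rw [herase, gfold_cons, gfold_cons]
      have hcd : c ≤ d := (List.pairwise_cons.mp hs).1 c hcL
      have hd0 : 0 ≤ d := le_of_lt (hp d (by simp))
      calc gfold (L.erase c) (dstep d (dstep c x))
          ≤ gfold (L.erase c) (dstep c (dstep d x)) := gfold_mono _ (dstep_swap hcd hd0)
        _ ≤ gfold L (dstep d x) := ih (dstep d x) (List.pairwise_cons.mp hs).2 (fun e he => hp e (List.mem_cons_of_mem d he)) hcL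

lemma sortD_perm (L : List Int) : (sortD L).Perm L := PySem.List.sorted_perm L (fun x => x) true

lemma sortD_pairwise (L : List Int) : (sortD L).Pairwise (fun p q => q ≤ p) := by
  simpa using PySem.List.sorted_pairwise_rev L (fun x => x)

lemma desc_unique {L₁ L₂ : List Int} (hperm : L₁.Perm L₂)
    (h1 : L₁.Pairwise (fun p q => q ≤ p)) (h2 : L₂.Pairwise (fun p q => q ≤ p)) : L₁ = L₂ := by
  exact hperm.eq_of_pairwise (fun a b _ _ hab hba => le_antisymm hba hab) h1 h2

lemma sortD_eq_of_perm {L₁ L₂ : List Int} (h : L₁.Perm L₂) : sortD L₁ = sortD L₂ :=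
  desc_unique ((sortD_perm L₁).trans (h.trans (sortD_perm L₂).symm)) (sortD_pairwise L₁) (sortD_pairwise L₂)

lemma sortD_cons_of_max {c : Int} {L : List Int} (h : ∀ d ∈ L, d ≤ c) : sortD (c :: L) = c :: sortD L := by
  refine desc_unique ?_ (sortD_pairwise _) ?_
  · exact (sortD_perm _).trans ((sortD_perm L).cons c).symm
  · refine List.pairwise_cons.mpr ⟨?_, sortD_pairwise L⟩
    intro d hd
    exact h d ((sortD_perm L).mem_iff.mp hd)

lemma sortD_erase {c : Int} {L : List Int} (_h : c ∈ L) : (sortD L).erase c = sortD (L.erase c) := by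
  refine desc_unique ?_ ?_ (sortD_pairwise _)
  · exact ((sortD_perm L).erase c).trans (sortD_perm (L.erase c)).symm
  · exact (sortD_pairwise L).sublist (List.erase_sublist)

lemma pvStep_dbl {a b : List Int} {i : Int} (h : isD b i = true) (s : Int) :
    pvStep a b i s = dstep (av a i) s := by
  simp only [isD, decide_eq_true_eq] at h
  simp only [pvStep, dstep, av, h, if_pos]
  ring_nf

lemma pvStep_ndbl {a b : List Int} {i : Int} (h : isD b i = false) (s : Int) :
    pvStep a b i s = max 0 (s + av a i) := by
  simp only [isD, decide_eq_false_iff_not] at h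
  simp [pvStep, av, h]

lemma pvP_nonneg (a b : List Int) (l : List Int) : 0 ≤ pvP a b l := by
  apply List.sum_nonneg
  intro x hx
  obtain ⟨i, hi, rfl⟩ := List.mem_map.mp hx
  have := (List.mem_filter.mp hi).2
  simp only [nposc, Bool.and_eq_true, decide_eq_true_eq] at this
  exact le_of_lt this.2

lemma pvD_pos (a b : List Int) (l : List Int) : ∀ c ∈ pvD a b l, 0 < c := by
  intro c hc
  obtain ⟨i, hi, rfl⟩ := List.mem_map.mp hc
  have := (List.mem_filter.mp hi).2
  simp only [dposc, Bool.and_eq_true, decide_eq_true_eq] at this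
  exact this.2

lemma pvV_perm (a b : List Int) {l₁ l₂ : List Int} (h : l₁.Perm l₂) (s : Int) :
    pvV a b l₁ s = pvV a b l₂ s := by
  have hpermD : (pvD a b l₁).Perm (pvD a b l₂) := (h.filter _).map _
  have hP : pvP a b l₁ = pvP a b l₂ := ((h.filter _).map _).sum_eq
  have hM : pvM a b l₁ = pvM a b l₂ := h.countP_eq _
  simp only [pvV, hP, hM, sortD_eq_of_perm hpermD]

lemma pvP_cons (a b : List Int) (i : Int) (l : List Int) :
    pvP a b (i :: l) = (if nposc a b i then av a i else 0) + pvP a b l := by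
  simp only [pvP, List.filter_cons]
  split_ifs with h <;> simp

lemma pvM_cons (a b : List Int) (i : Int) (l : List Int) :
    pvM a b (i :: l) = (if dnegc a b i then 1 else 0) + pvM a b l := by
  simp only [pvM, List.countP_cons]
  split_ifs with h <;> omega

lemma pvD_cons (a b : List Int) (i : Int) (l : List Int) :
    pvD a b (i :: l) = (if dposc a b i then [av a i] else []) ++ pvD a b l := by
  simp only [pvD, List.filter_cons]
  split_ifs with h <;> simp

lemma sortD_mem_pos (a b : List Int) (l : List Int) : ∀ d ∈ sortD (pvD a b l), 0 < d := by
  intro d hd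
  exact pvD_pos a b l d ((sortD_perm _).mem_iff.mp hd)

lemma gfold_insert_max (a b : List Int) (t : List Int) {c : Int} (hc : 0 < c) (x : Int) :
    gfold (sortD (pvD a b t)) (dstep c x) ≤ gfold (sortD (c :: pvD a b t)) x := by
  have hmem : c ∈ sortD (c :: pvD a b t) := (sortD_perm _).mem_iff.mpr (by simp)
  have herase : (sortD (c :: pvD a b t)).erase c = sortD (pvD a b t) := by
    rw [sortD_erase (by simp)]
    simp [List.erase_cons_head]
  calc gfold (sortD (pvD a b t)) (dstep c x)
      = gfold ((sortD (c :: pvD a b t)).erase c) (dstep c x) := by rw [herase]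
    _ ≤ gfold (sortD (c :: pvD a b t)) x := by
        refine gfold_exchange _ c x (sortD_pairwise _) ?_ hmem
        intro d hd
        rcases List.mem_cons.mp ((sortD_perm _).mem_iff.mp hd) with h | h
        · omega
        · exact pvD_pos a b t d h

lemma pv_dom (a b : List Int) {l : List Int} {i : Int} (hi : i ∈ l) {s : Int} (hs : 0 ≤ s) :
    pvV a b (l.erase i) (pvStep a b i s) ≤ pvV a b l s := by
  rw [pvV_perm a b (List.perm_cons_erase hi) s]
  have hPt := pvP_nonneg a b (l.erase i)
  by_cases hd : isD b i = true
  · by_cases hav : 0 < av a i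
    · have h1 : dposc a b i = true := by simp [dposc, hd, hav]
      have h2 : dnegc a b i = false := by simp only [dnegc, hd, Bool.true_and]; simpa using hav
      have h3 : nposc a b i = false := by simp [nposc, hd]
      rw [pvStep_dbl hd]
      simp only [pvV, pvP_cons, pvM_cons, pvD_cons, h1, h2, h3, Bool.false_eq_true,
        if_true, if_false, List.singleton_append, List.nil_append, zero_add]
      refine mul_le_mul_of_nonneg_left ?_ (by positivity)
      have step1 : dstep (av a i) s + pvP a b (l.erase i) ≤ dstep (av a i) (s + pvP a b (l.erase i)) := by
        simp only [dstep]; omega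
      exact le_trans (gfold_mono _ step1) (gfold_insert_max a b (l.erase i) hav _)
    · have h1 : dposc a b i = false := by simp [dposc, hd]; omega
      have h2 : dnegc a b i = true := by simp [dnegc, hd]; omega
      have h3 : nposc a b i = false := by simp [nposc, hd]
      have hps : pvStep a b i s = 2 * s := by
        rw [pvStep_dbl hd]; simp only [dstep]; omega
      rw [hps]
      simp only [pvV, pvP_cons, pvM_cons, pvD_cons, h1, h2, h3, Bool.false_eq_true,
        if_true, if_false, List.nil_append, zero_add]
      have hdbl : 2 * s + pvP a b (l.erase i) ≤ 2 * (s + pvP a b (l.erase i)) := by omega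
      have c1 : gfold (sortD (pvD a b (l.erase i))) (2 * s + pvP a b (l.erase i))
          ≤ 2 * gfold (sortD (pvD a b (l.erase i))) (s + pvP a b (l.erase i)) := by
        refine le_trans (gfold_mono _ hdbl) ?_
        exact gfold_two _ (fun c hc => le_of_lt (sortD_mem_pos a b (l.erase i) c hc)) _
      calc 2 ^ pvM a b (l.erase i) * gfold (sortD (pvD a b (l.erase i))) (2 * s + pvP a b (l.erase i))
          ≤ 2 ^ pvM a b (l.erase i) * (2 * gfold (sortD (pvD a b (l.erase i))) (s + pvP a b (l.erase i))) :=
            mul_le_mul_of_nonneg_left c1 (by positivity)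
        _ = 2 ^ (1 + pvM a b (l.erase i)) * gfold (sortD (pvD a b (l.erase i))) (s + pvP a b (l.erase i)) := by
            rw [pow_add]; ring
  · have hd' : isD b i = false := by simpa using hd
    have h1 : dposc a b i = false := by simp [dposc, hd']
    have h2 : dnegc a b i = false := by simp [dnegc, hd']
    have h3n : nposc a b i = !(decide (av a i ≤ 0)) := by
      simp only [nposc, hd', Bool.not_false, Bool.true_and]
      rcases lt_or_ge 0 (av a i) with h | h <;> simp [h] <;> omega
    by_cases hav : 0 < av a i
    · have h3 : nposc a b i = true := by rw [h3n]; simpa using hav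
      have hps : pvStep a b i s = s + av a i := by rw [pvStep_ndbl hd']; omega
      rw [hps]
      simp only [pvV, pvP_cons, pvM_cons, pvD_cons, h1, h2, h3, Bool.false_eq_true,
        if_true, if_false, List.nil_append, zero_add]
      rw [← add_assoc]
    · have h3 : nposc a b i = false := by rw [h3n]; simpa using hav
      have hps : pvStep a b i s ≤ s := by rw [pvStep_ndbl hd']; omega
      simp only [pvV, pvP_cons, pvM_cons, pvD_cons, h1, h2, h3, Bool.false_eq_true,
        if_true, if_false, List.nil_append, zero_add]
      refine mul_le_mul_of_nonneg_left (gfold_mono _ (by omega)) (by positivity)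

lemma sortD_nil : sortD [] = [] := (sortD_perm []).eq_nil

lemma pvV_nil (a b : List Int) (s : Int) : pvV a b [] s = s := by
  simp [pvV, pvM, pvD, pvP, sortD_nil, gfold]

lemma runP_cons (a b : List Int) (i : Int) (p : List Int) (s : Int) :
    runP a b (i :: p) s = runP a b p (pvStep a b i s) := rfl

lemma pvStep_nonneg (a b : List Int) (i : Int) {s : Int} (hs : 0 ≤ s) : 0 ≤ pvStep a b i s := by
  unfold pvStep
  split_ifs <;> [exact le_max_of_le_left (by omega); exact le_max_left 0 _]

lemma runP_le (a b : List Int) : ∀ (p l : List Int) (s : Int), p.Perm l → 0 ≤ s →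
    runP a b p s ≤ pvV a b l s := by
  intro p
  induction p with
  | nil =>
    intro l s hperm hs
    have : l = [] := hperm.symm.eq_nil
    subst this
    simp [runP, pvV_nil]
  | cons i p' ih =>
    intro l s hperm hs
    have hmem : i ∈ l := hperm.subset (List.mem_cons_self)
    have hp' : p'.Perm (l.erase i) := (List.cons_perm_iff_perm_erase.mp hperm).2
    rw [runP_cons]
    exact le_trans (ih (l.erase i) _ hp' (pvStep_nonneg a b i hs)) (pv_dom a b hmem hs)

lemma pvP_zero (a b : List Int) {l : List Int} (h : ∀ i ∈ l, isD b i = true) : pvP a b l = 0 := by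
  have : l.filter (nposc a b) = [] := by
    rw [List.filter_eq_nil_iff]
    intro i hi
    simp [nposc, h i hi]
  simp [pvP, this]

lemma pvD_empty (a b : List Int) {l : List Int} (h : ∀ i ∈ l, dposc a b i = false) : pvD a b l = [] := by
  have : l.filter (dposc a b) = [] := by
    rw [List.filter_eq_nil_iff]
    intro i hi
    simp [h i hi]
  simp [pvD, this]

lemma pv_ach (a b : List Int) : ∀ (N : Nat) (l : List Int) (s : Int), l.length ≤ N → 0 ≤ s →
    (∀ i ∈ l, isD b i = false → av a i ≤ 0 → s = 0) →
    ∃ p, p.Perm l ∧ runP a b p s = pvV a b l s := by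
  intro N
  induction N with
  | zero =>
    intro l s hlen _ _
    have : l = [] := List.length_eq_zero_iff.mp (Nat.le_zero.mp hlen)
    subst this
    exact ⟨[], List.Perm.refl _, by simp [runP, pvV_nil]⟩
  | succ N ih =>
    intro l s hlen hs hzero
    by_cases hl : l = []
    · subst hl
      exact ⟨[], List.Perm.refl _, by simp [runP, pvV_nil]⟩
    have hlenE : ∀ i ∈ l, (l.erase i).length ≤ N := by
      intro i hi
      have := List.length_erase_of_mem hi
      omega
    by_cases h1 : ∃ i ∈ l, isD b i = false ∧ av a i ≤ 0
    · obtain ⟨i, hil, hdi, havi⟩ := h1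
      have hs0 : s = 0 := hzero i hil hdi havi
      subst hs0
      have hstep : pvStep a b i 0 = 0 := by rw [pvStep_ndbl hdi]; omega
      have h1' : dposc a b i = false := by simp [dposc, hdi]
      have h2' : dnegc a b i = false := by simp [dnegc, hdi]
      have h3' : nposc a b i = false := by
        simp only [nposc, hdi, Bool.not_false, Bool.true_and, decide_eq_false_iff_not]
        omega
      obtain ⟨p', hperm', hrun'⟩ := ih (l.erase i) 0 (hlenE i hil) le_rfl
        (fun _ _ _ _ => rfl)
      refine ⟨i :: p', (hperm'.cons i).trans (List.perm_cons_erase hil).symm, ?_⟩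
      rw [runP_cons, hstep, hrun', pvV_perm a b (List.perm_cons_erase hil) 0]
      simp only [pvV, pvP_cons, pvM_cons, pvD_cons, h1', h2', h3', Bool.false_eq_true,
        if_false, List.nil_append, zero_add]
    · push_neg at h1
      by_cases h2 : ∃ i ∈ l, isD b i = false
      · obtain ⟨i, hil, hdi⟩ := h2
        have havi : 0 < av a i := h1 i hil hdi
        have hstep : pvStep a b i s = s + av a i := by rw [pvStep_ndbl hdi]; omega
        have h1' : dposc a b i = false := by simp [dposc, hdi]
        have h2' : dnegc a b i = false := by simp [dnegc, hdi]
        have h3' : nposc a b i = true := by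
          simp only [nposc, hdi, Bool.not_false, Bool.true_and, decide_eq_true_eq]
          omega
        obtain ⟨p', hperm', hrun'⟩ := ih (l.erase i) (s + av a i) (hlenE i hil) (by omega)
          (fun j hj hdj havj => absurd (h1 j (List.mem_of_mem_erase hj) hdj) (by omega))
        refine ⟨i :: p', (hperm'.cons i).trans (List.perm_cons_erase hil).symm, ?_⟩
        rw [runP_cons, hstep, hrun', pvV_perm a b (List.perm_cons_erase hil) s]
        simp only [pvV, pvP_cons, pvM_cons, pvD_cons, h1', h2', h3', Bool.false_eq_true,
          if_true, if_false, List.nil_append, zero_add]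
        rw [← add_assoc]
      · push_neg at h2
        have hall : ∀ i ∈ l, isD b i = true := by
          intro i hi
          have := h2 i hi
          simpa using this
        by_cases h3 : ∃ i ∈ l, dposc a b i = true
        · obtain ⟨iw, hiwl, hiwp⟩ := h3
          have hFne : iw ∈ l.filter (dposc a b) := List.mem_filter.mpr ⟨hiwl, hiwp⟩
          obtain ⟨i0, hmax0⟩ : ∃ i0, PySem.List.max? (l.filter (dposc a b)) (fun j => av a j) = some i0 := by
            cases h : PySem.List.max? (l.filter (dposc a b)) (fun j => av a j) with
            | none =>
              rw [PySem.List.max?_eq_none_iff] at h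
              rw [h] at hFne
              cases hFne
            | some i0 => exact ⟨i0, rfl⟩
          have hi0F : i0 ∈ l.filter (dposc a b) := PySem.List.max?_mem hmax0
          have hi0l : i0 ∈ l := (List.mem_filter.mp hi0F).1
          have hdp0 : dposc a b i0 = true := (List.mem_filter.mp hi0F).2
          have hmax : ∀ j ∈ l.filter (dposc a b), av a j ≤ av a i0 := PySem.List.max?_isMax hmax0
          have hdp0' := hdp0
          simp only [dposc, Bool.and_eq_true, decide_eq_true_eq] at hdp0'
          have hd0 : isD b i0 = true := hdp0'.1
          have hav0 : 0 < av a i0 := hdp0'.2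
          have h2' : dnegc a b i0 = false := by
            simp only [dnegc, hd0, Bool.true_and, decide_eq_false_iff_not]
            omega
          have hstep : pvStep a b i0 s = dstep (av a i0) s := pvStep_dbl hd0 s
          have hsnn : 0 ≤ dstep (av a i0) s := by simp only [dstep]; omega
          obtain ⟨p', hperm', hrun'⟩ := ih (l.erase i0) (dstep (av a i0) s) (hlenE i0 hi0l) hsnn
            (fun j hj hdj _ => absurd (hall j (List.mem_of_mem_erase hj)) (by simp [hdj]))
          refine ⟨i0 :: p', (hperm'.cons i0).trans (List.perm_cons_erase hi0l).symm, ?_⟩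
          have hP1 : pvP a b l = 0 := pvP_zero a b hall
          have hP2 : pvP a b (l.erase i0) = 0 :=
            pvP_zero a b (fun j hj => hall j (List.mem_of_mem_erase hj))
          have hDperm : (pvD a b l).Perm (av a i0 :: pvD a b (l.erase i0)) := by
            have := ((List.perm_cons_erase hi0l).filter (dposc a b)).map (av a)
            rw [List.filter_cons, if_pos hdp0] at this
            exact this
          have hsort : sortD (pvD a b l) = av a i0 :: sortD (pvD a b (l.erase i0)) := by
            rw [sortD_eq_of_perm hDperm]
            refine sortD_cons_of_max ?_
            intro d hd
            obtain ⟨j, hj, rfl⟩ := List.mem_map.mp hd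
            have hjF : j ∈ l.filter (dposc a b) := List.mem_filter.mpr
              ⟨List.mem_of_mem_erase (List.mem_filter.mp hj).1, (List.mem_filter.mp hj).2⟩
            exact hmax j hjF
          have hM : pvM a b l = pvM a b (l.erase i0) := by
            rw [pvM, (List.perm_cons_erase hi0l).countP_eq, List.countP_cons]
            simp [h2', pvM]
          rw [runP_cons, hstep, hrun']
          rw [pvV, pvV, hP1, hP2, hM, hsort, gfold_cons, add_zero, add_zero]
        · push_neg at h3
          have hallneg : ∀ i ∈ l, dposc a b i = false := by
            intro i hi
            have := h3 i hi
            simpa using this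
          have havneg : ∀ i ∈ l, av a i ≤ 0 := by
            intro i hi
            have h' := hallneg i hi
            simp only [dposc, hall i hi, Bool.true_and, decide_eq_false_iff_not] at h'
            omega
          cases l with
          | nil => exact absurd rfl hl
          | cons i t =>
            have hil : i ∈ i :: t := List.mem_cons_self
            have hstep : pvStep a b i s = 2 * s := by
              rw [pvStep_dbl (hall i hil)]
              have := havneg i hil
              simp only [dstep]
              omega
            have h2' : dnegc a b i = true := by
              simp only [dnegc, hall i hil, Bool.true_and, decide_eq_true_eq]
              exact havneg i hil
            obtain ⟨p', hperm', hrun'⟩ := ih t (2 * s) (by simp at hlen; omega) (by omega)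
              (fun j hj hdj _ => absurd (hall j (List.mem_cons_of_mem i hj)) (by simp [hdj]))
            refine ⟨i :: p', hperm'.cons i, ?_⟩
            have hD1 : pvD a b (i :: t) = [] := pvD_empty a b hallneg
            have hD2 : pvD a b t = [] := pvD_empty a b (fun j hj => hallneg j (List.mem_cons_of_mem i hj))
            have hP1 : pvP a b (i :: t) = 0 := pvP_zero a b hall
            have hP2 : pvP a b t = 0 := pvP_zero a b (fun j hj => hall j (List.mem_cons_of_mem i hj))
            rw [runP_cons, hstep, hrun']
            rw [pvV, pvV, hD1, hD2, hP1, hP2, pvM_cons, if_pos h2', sortD_nil]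
            simp only [gfold, List.foldl_nil, add_zero]
            rw [pow_add]
            ring

-- A-side loop lemmas
lemma foldl_le_init {g : Int → Int → Int} (hg : ∀ acc i, acc ≤ g acc i) :
    ∀ (l : List Int) (acc : Int), acc ≤ l.foldl g acc := by
  intro l
  induction l with
  | nil => simp
  | cons j l ih => intro acc; exact le_trans (hg acc j) (ih (g acc j))

lemma dfsA_ge (a b : List Int) : ∀ (f : Nat) (st : List Int) (s m : Int), m ≤ dfsA a b f st s m := by
  intro f
  induction f with
  | zero => intro st s m; simp [dfsA]
  | succ f ih =>
    intro st s m
    exact foldl_le_init (fun acc i => ih (st.erase i) (pvStep a b i s) acc) st m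

lemma foldl_reach {g : Int → Int → Int} {i X : Int} (hg : ∀ acc j, acc ≤ g acc j)
    (hX : ∀ acc, X ≤ g acc i) : ∀ (l : List Int) (acc : Int), i ∈ l → X ≤ l.foldl g acc := by
  intro l
  induction l with
  | nil => intro acc h; cases h
  | cons j l ih =>
    intro acc hmem
    by_cases hij : i ∈ l
    · exact ih (g acc j) hij
    · have : j = i := by
        rcases List.mem_cons.mp hmem with h | h
        · exact h.symm
        · exact absurd h hij
      subst this
      exact le_trans (hX acc) (foldl_le_init hg l (g acc j))

lemma foldl_bdd {g : Int → Int → Int} {B : Int} {st : List Int}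
    (hB : ∀ acc i, i ∈ st → acc ≤ B → g acc i ≤ B) :
    ∀ (l : List Int) (acc : Int), (∀ i ∈ l, i ∈ st) → acc ≤ B → l.foldl g acc ≤ B := by
  intro l
  induction l with
  | nil => intro acc _ h; simpa using h
  | cons j l ih =>
    intro acc hsub hacc
    exact ih (g acc j) (fun i hi => hsub i (by simp [hi]))
      (hB acc j (hsub j (by simp)) hacc)

lemma dfsA_upper (a b : List Int) : ∀ (f : Nat) (st : List Int) (s m K : Int), st.length = f →
    (∀ p, p.Perm st → runP a b p s ≤ K) → dfsA a b f st s m ≤ max m K := by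
  intro f
  induction f with
  | zero =>
    intro st s m K hlen hK
    have hst : st = [] := List.length_eq_zero_iff.mp hlen
    subst hst
    have hsK : s ≤ K := by simpa [runP] using hK [] (List.Perm.refl [])
    simp only [dfsA]
    omega
  | succ f ih =>
    intro st s m K hlen hK
    simp only [dfsA]
    refine foldl_bdd ?_ st m (fun i hi => hi) (le_max_left m K)
    intro acc i hi hacc
    have hlen' : (st.erase i).length = f := by
      have := List.length_erase_of_mem hi
      omega
    have hK' : ∀ p, p.Perm (st.erase i) → runP a b p (pvStep a b i s) ≤ K := by
      intro p hp
      have hps : (i :: p).Perm st := (hp.cons i).trans (List.perm_cons_erase hi).symm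
      simpa [runP_cons] using hK (i :: p) hps
    refine le_trans (ih (st.erase i) (pvStep a b i s) acc K hlen' hK') ?_
    exact max_le hacc (le_max_right m K)

lemma dfsA_lower (a b : List Int) : ∀ (p st : List Int) (s m : Int), p.Perm st →
    runP a b p s ≤ dfsA a b st.length st s m := by
  intro p
  induction p with
  | nil =>
    intro st s m hperm
    have : st = [] := hperm.symm.eq_nil
    subst this
    simp only [runP, List.foldl_nil, List.length_nil, dfsA]
    exact le_max_right m s
  | cons i p' ih =>
    intro st s m hperm
    have hi : i ∈ st := hperm.subset List.mem_cons_self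
    have hp' : p'.Perm (st.erase i) := (List.cons_perm_iff_perm_erase.mp hperm).2
    have hlen : st.length = p'.length + 1 := by
      rw [← hperm.length_eq]
      simp
    rw [hlen, runP_cons]
    simp only [dfsA]
    refine foldl_reach (fun acc j => dfsA_ge a b _ _ _ acc) ?_ st m hi
    intro acc
    have hrec := ih (st.erase i) (pvStep a b i s) acc hp'
    have hlen' : (st.erase i).length = p'.length := by
      have := List.length_erase_of_mem hi
      omega
    rwa [hlen'] at hrec

lemma fold_triple (a b : List Int) : ∀ (l : List Int) (acc : Int × Int × List Int),
    l.foldl (bstep a b) acc = (acc.1 + pvP a b l, acc.2.1 + (pvM a b l : Int), acc.2.2 ++ pvD a b l) := by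
  intro l
  induction l with
  | nil =>
    intro acc
    simp [pvP, pvM, pvD]
  | cons i l ih =>
    intro acc
    rw [List.foldl_cons, ih]
    by_cases hd : isD b i = true
    · have hd' : (PySem.List.pyGet? b i).getD 0 = 1 := by simpa [isD] using hd
      by_cases hav : 0 < av a i
      · have h1 : dposc a b i = true := by simp [dposc, hd, hav]
        have h2 : dnegc a b i = false := by simp only [dnegc, hd, Bool.true_and]; simpa using hav
        have h3 : nposc a b i = false := by simp [nposc, hd]
        have hav' : (PySem.List.pyGet? a i).getD 0 > 0 := hav
        simp only [bstep, hd', if_pos, hav', if_true, pvP_cons, pvM_cons, pvD_cons,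
          h1, h2, h3, Bool.false_eq_true, if_false, Prod.mk.injEq, av]
        refine ⟨by omega, by omega, by simp [av]⟩
      · have h1 : dposc a b i = false := by simp [dposc, hd]; omega
        have h2 : dnegc a b i = true := by simp [dnegc, hd]; omega
        have h3 : nposc a b i = false := by simp [nposc, hd]
        have hav' : ¬ (PySem.List.pyGet? a i).getD 0 > 0 := by simpa [av] using hav
        simp only [bstep, hd', if_pos, hav', if_false, pvP_cons, pvM_cons, pvD_cons,
          h1, h2, h3, Bool.false_eq_true, if_true, Prod.mk.injEq]
        refine ⟨by omega, by push_cast; omega, by simp⟩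
    · have hdF : isD b i = false := by simpa using hd
      have hd' : ¬ (PySem.List.pyGet? b i).getD 0 = 1 := by simpa [isD] using hdF
      have h1 : dposc a b i = false := by simp [dposc, hdF]
      have h2 : dnegc a b i = false := by simp [dnegc, hdF]
      by_cases hav : 0 < av a i
      · have h3 : nposc a b i = true := by
          simp only [nposc, hdF, Bool.not_false, Bool.true_and, decide_eq_true_eq]
          omega
        have hav' : (PySem.List.pyGet? a i).getD 0 > 0 := hav
        simp only [bstep, hd', if_neg, hav', if_true, pvP_cons, pvM_cons, pvD_cons,
          h1, h2, h3, Bool.false_eq_true, if_false, Prod.mk.injEq, av]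
        refine ⟨by omega, by omega, by simp⟩
      · have h3 : nposc a b i = false := by
          simp only [nposc, hdF, Bool.not_false, Bool.true_and, decide_eq_false_iff_not]
          omega
        have hav' : ¬ (PySem.List.pyGet? a i).getD 0 > 0 := by simpa [av] using hav
        simp only [bstep, hd', if_neg, hav', if_false, pvP_cons, pvM_cons, pvD_cons,
          h1, h2, h3, Bool.false_eq_true, Prod.mk.injEq]
        refine ⟨by omega, by omega, by simp⟩

lemma solve_alt_eq (n : Int) (a b : List Int) : solve_alt n a b = pvV a b (PySem.List.pyRange 0 n 1) 0 := by
  unfold solve_alt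
  rw [fold_triple a b _ (0, 0, [])]
  simp only [zero_add, List.nil_append, Int.toNat_natCast]
  show gfold (sortD (pvD a b (PySem.List.pyRange 0 n 1))) (pvP a b (PySem.List.pyRange 0 n 1)) *
    2 ^ pvM a b (PySem.List.pyRange 0 n 1) = _
  rw [pvV, zero_add, mul_comm]

lemma solve_eq (n : Int) (a b : List Int) : solve n a b = pvV a b (PySem.List.pyRange 0 n 1) 0 := by
  unfold solve
  refine le_antisymm ?_ ?_
  · have hnn : 0 ≤ pvV a b (PySem.List.pyRange 0 n 1) 0 := by
      unfold pvV
      refine mul_nonneg (by positivity) (gfold_nonneg _ ?_)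
      have := pvP_nonneg a b (PySem.List.pyRange 0 n 1)
      omega
    have h := dfsA_upper a b (PySem.List.pyRange 0 n 1).length (PySem.List.pyRange 0 n 1) 0 0
      (pvV a b (PySem.List.pyRange 0 n 1) 0) rfl
      (fun p hp => runP_le a b p (PySem.List.pyRange 0 n 1) 0 hp le_rfl)
    rwa [max_eq_right hnn] at h
  · obtain ⟨p, hp, hrun⟩ := pv_ach a b (PySem.List.pyRange 0 n 1).length (PySem.List.pyRange 0 n 1) 0
      le_rfl le_rfl (fun _ _ _ _ => rfl)
    have h := dfsA_lower a b p (PySem.List.pyRange 0 n 1) 0 0 hp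
    rwa [hrun] at h

-- ===== VERDICT (by name: the statement is the Claim_ definition above) =====
theorem solve_spec : Claim_equal_solve := by
  intro n a b _ _
  unfold Spec_solve
  rw [solve_eq, solve_alt_eq]
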